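-- pv_equiv track=rewrite | github.com/tssanjai98/CSE512-iot-data-managment | backend/queryPlanning2.py | sanitize_mermaid_label
-- ===== SOURCE A (Python) =====
-- def sanitize_mermaid_label(label):
--     """
--     Replaces special characters in labels with meaningful alternatives for Mermaid.
--     """
--     replacements = {
--         ">": "GT",
--         "<": "LT",
--         "=": "EQ",
--         ">=": "GTE",
--         "<=": "LTE",
--         "!=": "NEQ",
--         " ": "_",
--         ",": "_",
--         "'": "",
--         ".": "_",
--         "(": "",
--         ")": "",
--     }
--     for symbol, replacement in replacements.items():
--         label = label.replace(symbol, replacement)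
--     return label
-- ===== SOURCE B (Python) =====
-- _MAP = {
--     ">": "GT",
--     "<": "LT",
--     "=": "EQ",
--     " ": "_",
--     ",": "_",
--     "'": "",
--     ".": "_",
--     "(": "",
--     ")": "",
-- }
--
--
-- def sanitize_mermaid_label(label):
--     """
--     Replaces special characters in labels with meaningful alternatives for Mermaid.
--     """
--     return "".join(_MAP.get(ch, ch) for ch in label)
-- ===== Notes on version B (the rewrite author's own statement) =====
-- stated objective: simpler
-- what changed: Replaces the twelve sequential whole-string .replace passes (three of which, '>='/'<='/'!=', are dead because the single-char replaces fire first) by one pass over the characters with a single-char lookup table.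
import Mathlib
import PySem

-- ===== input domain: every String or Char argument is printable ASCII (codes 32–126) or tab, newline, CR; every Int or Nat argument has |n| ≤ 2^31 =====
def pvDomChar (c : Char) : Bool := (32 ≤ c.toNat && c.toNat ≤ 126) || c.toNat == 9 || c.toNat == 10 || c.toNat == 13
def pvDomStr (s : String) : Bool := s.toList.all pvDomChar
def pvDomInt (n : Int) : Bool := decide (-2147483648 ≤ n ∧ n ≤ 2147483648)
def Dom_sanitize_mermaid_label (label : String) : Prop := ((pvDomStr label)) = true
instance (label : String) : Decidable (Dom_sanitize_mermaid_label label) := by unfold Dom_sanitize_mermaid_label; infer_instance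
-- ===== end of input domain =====

-- B replaces A's twelve sequential whole-string .replace passes (three of which are dead)
-- by one pass over the characters with a single-char lookup table; equivalence is proved on Dom.


-- ===== PORT A =====
-- the dict literal of A, as an association list in insertion order
def pvReplacementsA : List (String × String) :=
  [(">", "GT"), ("<", "LT"), ("=", "EQ"), (">=", "GTE"), ("<=", "LTE"), ("!=", "NEQ"),
   (" ", "_"), (",", "_"), ("'", ""), (".", "_"), ("(", ""), (")", "")]

def sanitize_mermaid_label (label : String) : String :=
  pvReplacementsA.foldl (fun lab p => PySem.Str.replace lab p.1 p.2) label

-- ===== PORT B =====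
-- B's single-character mapping dict
def pvMapB : PySem.Dict Char String :=
  PySem.Dict.ofList
    [('>', "GT"), ('<', "LT"), ('=', "EQ"), (' ', "_"), (',', "_"),
     ('\'', ""), ('.', "_"), ('(', ""), (')', "")]

def sanitize_mermaid_label_alt (label : String) : String :=
  PySem.Str.join "" (label.toList.map (fun ch => pvMapB.getD ch (String.ofList [ch])))

-- ===== PRECONDITION & SPEC =====
def Spec_sanitize_mermaid_label (label : String) (out : String) : Prop := out = sanitize_mermaid_label_alt label
instance (label : String) (out : String) : Decidable (Spec_sanitize_mermaid_label label out) := by unfold Spec_sanitize_mermaid_label; infer_instance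

-- ===== CLAIM (what is proved, stated in full; the proofs are below) =====
def Claim_equal_sanitize_mermaid_label : Prop := ∀ (label : String), Dom_sanitize_mermaid_label label → Spec_sanitize_mermaid_label label (sanitize_mermaid_label label)

-- ===== LEMMAS AND PROOFS =====

-- single-character replace is a flatMap over the characters
theorem go_single (c : Char) (new : List Char) :
    ∀ (fuel : Nat) (l acc : List Char), l.length ≤ fuel →
      PySem.Chars.replace.go [c] new fuel l acc
        = acc.reverse ++ l.flatMap (fun d => if d = c then new else [d]) := by
  intro fuel
  induction fuel with
  | zero =>
    intro l acc h
    cases l with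
    | nil => simp [PySem.Chars.replace.go]
    | cons d t => simp at h
  | succ n ih =>
    intro l acc h
    cases l with
    | nil => simp [PySem.Chars.replace.go]
    | cons d t =>
      by_cases hd : c = d
      · subst hd
        have : [c].isPrefixOf (c :: t) = true := by simp [List.isPrefixOf]
        simp only [PySem.Chars.replace.go, this, if_pos, List.length_cons, List.length_nil,
          List.drop_succ_cons, List.drop_zero, Nat.zero_add]
        rw [ih t (new.reverse ++ acc) (by simpa using Nat.le_of_succ_le_succ h)]
        simp
      · have : [c].isPrefixOf (d :: t) = false := by
          simp [List.isPrefixOf]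
          exact fun hh => hd hh
        simp only [PySem.Chars.replace.go, this, Bool.false_eq_true, if_neg, not_false_iff]
        rw [ih t (d :: acc) (by simpa using Nat.le_of_succ_le_succ h)]
        have : d ≠ c := fun hh => hd hh.symm
        simp [this]

theorem replace_single (c : Char) (new s : List Char) :
    PySem.Chars.replace s [c] new = s.flatMap (fun d => if d = c then new else [d]) := by
  rw [PySem.Chars.replace]
  simp only [List.isEmpty, Bool.false_eq_true, if_neg, not_false_iff]
  simpa using go_single c new s.length s [] (le_refl _)

-- replace is the identity when the pattern does not occur
theorem go_noinfix (old new : List Char) :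
    ∀ (fuel : Nat) (l acc : List Char), ¬ old <:+: l →
      PySem.Chars.replace.go old new fuel l acc = acc.reverse ++ l := by
  intro fuel
  induction fuel with
  | zero => intro l acc _; cases l <;> simp [PySem.Chars.replace.go]
  | succ n ih =>
    intro l acc h
    cases l with
    | nil => simp [PySem.Chars.replace.go]
    | cons d t =>
      have hpre : old.isPrefixOf (d :: t) = false := by
        by_contra hb
        have : old.isPrefixOf (d :: t) = true := by
          cases hx : old.isPrefixOf (d :: t) <;> simp_all
        exact h (List.isPrefixOf_iff_prefix.mp this).isInfix
      simp only [PySem.Chars.replace.go, hpre, Bool.false_eq_true, if_neg, not_false_iff]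
      rw [ih t (d :: acc) (fun hi => h (List.infix_cons hi))]
      simp

theorem replace_noinfix (old new s : List Char) (hne : old ≠ []) (h : ¬ old <:+: s) :
    PySem.Chars.replace s old new = s := by
  rw [PySem.Chars.replace]
  have : old.isEmpty = false := by cases old <;> simp_all
  simp only [this, Bool.false_eq_true, if_neg, not_false_iff]
  simpa using go_noinfix old new s.length s [] h

-- '=' never occurs after the first three single-char passes, for any l
theorem eq_not_mem_flatMap (l : List Char) :
    ('=' : Char) ∉ l.flatMap (fun d => if d = '=' then ['E', 'Q'] else [d]) := by
  intro h
  rw [List.mem_flatMap] at h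
  obtain ⟨d, _, hd⟩ := h
  by_cases hde : d = '='
  · simp [hde] at hd
  · rw [if_neg hde] at hd
    simp at hd
    exact hde hd.symm

theorem noinfix_of_eq_mem (pat s : List Char) (hm : ('=' : Char) ∈ pat)
    (hs : ('=' : Char) ∉ s) : ¬ pat <:+: s :=
  fun hi => hs (hi.subset hm)

theorem join_nil_flatten (parts : List (List Char)) :
    PySem.Chars.join [] parts = parts.flatten := by
  induction parts with
  | nil => simp [PySem.Chars.join, List.intercalate]
  | cons p ps ih =>
    cases ps with
    | nil => simp [PySem.Chars.join, List.intercalate]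
    | cons q qs =>
      simp only [PySem.Chars.join, List.intercalate] at *
      simp [List.intersperse] at *
      simp [ih]

theorem toList_inj (a b : String) (h : a.toList = b.toList) : a = b := String.toList_inj.mp h

-- ===== VERDICT (by name: the statement is the Claim_ definition above) =====
theorem sanitize_mermaid_label_spec : Claim_equal_sanitize_mermaid_label := by
  intro label _
  unfold Spec_sanitize_mermaid_label
  apply toList_inj
  simp only [sanitize_mermaid_label, sanitize_mermaid_label_alt, pvReplacementsA, List.foldl,
    PySem.Str.toList_replace, PySem.Str.toList_join]
  have t1 : (">" : String).toList = ['>'] := by decide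
  have t2 : ("<" : String).toList = ['<'] := by decide
  have t3 : ("=" : String).toList = ['='] := by decide
  have t4 : (">=" : String).toList = ['>', '='] := by decide
  have t5 : ("<=" : String).toList = ['<', '='] := by decide
  have t6 : ("!=" : String).toList = ['!', '='] := by decide
  have t7 : (" " : String).toList = [' '] := by decide
  have t8 : ("," : String).toList = [','] := by decide
  have t9 : ("'" : String).toList = ['\''] := by decide
  have t10 : ("." : String).toList = ['.'] := by decide
  have t11 : ("(" : String).toList = ['('] := by decide
  have t12 : (")" : String).toList = [')'] := by decide
  have u1 : ("GT" : String).toList = ['G', 'T'] := by decide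
  have u2 : ("LT" : String).toList = ['L', 'T'] := by decide
  have u3 : ("EQ" : String).toList = ['E', 'Q'] := by decide
  have u4 : ("GTE" : String).toList = ['G', 'T', 'E'] := by decide
  have u5 : ("LTE" : String).toList = ['L', 'T', 'E'] := by decide
  have u6 : ("NEQ" : String).toList = ['N', 'E', 'Q'] := by decide
  have u7 : ("_" : String).toList = ['_'] := by decide
  have u8 : ("" : String).toList = [] := by decide
  rw [t1, t2, t3, t4, t5, t6, t7, t8, t9, t10, t11, t12, u1, u2, u3, u4, u5, u6, u7, u8]
  rw [replace_single '>' ['G', 'T'], replace_single '<' ['L', 'T'], replace_single '=' ['E', 'Q']]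
  rw [replace_noinfix ['>', '='] ['G', 'T', 'E'] _ (by decide)
        (noinfix_of_eq_mem _ _ (by decide) (eq_not_mem_flatMap _))]
  rw [replace_noinfix ['<', '='] ['L', 'T', 'E'] _ (by decide)
        (noinfix_of_eq_mem _ _ (by decide) (eq_not_mem_flatMap _))]
  rw [replace_noinfix ['!', '='] ['N', 'E', 'Q'] _ (by decide)
        (noinfix_of_eq_mem _ _ (by decide) (eq_not_mem_flatMap _))]
  rw [replace_single ' ' ['_'], replace_single ',' ['_'], replace_single '\'' [],
      replace_single '.' ['_'], replace_single '(' [], replace_single ')' []]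
  rw [join_nil_flatten, List.map_map, ← List.flatMap_def]
  simp only [List.flatMap_assoc]
  apply List.flatMap_congr
  intro c _
  by_cases h1 : c = '>'
  · subst h1; decide
  by_cases h2 : c = '<'
  · subst h2; decide
  by_cases h3 : c = '='
  · subst h3; decide
  by_cases h4 : c = ' '
  · subst h4; decide
  by_cases h5 : c = ','
  · subst h5; decide
  by_cases h6 : c = '\''
  · subst h6; decide
  by_cases h7 : c = '.'
  · subst h7; decide
  by_cases h8 : c = '('
  · subst h8; decide
  by_cases h9 : c = ')'
  · subst h9; decide
  have hM : pvMapB.items = [('>', "GT"), ('<', "LT"), ('=', "EQ"), (' ', "_"), (',', "_"),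
      ('\'', ""), ('.', "_"), ('(', ""), (')', "")] := by decide
  simp only [if_neg h1, if_neg h2, if_neg h3, if_neg h4, if_neg h5, if_neg h6, if_neg h7,
    if_neg h8, if_neg h9, List.flatMap_cons, List.flatMap_nil, List.append_nil,
    PySem.Dict.getD, PySem.Dict.get?, hM, List.find?]
  have hbeq : ∀ k : Char, ¬ c = k → (k == c) = false := fun k hk => by
    simp [Ne.symm hk]
  simp [hbeq _ h1, hbeq _ h2, hbeq _ h3, hbeq _ h4, hbeq _ h5, hbeq _ h6, hbeq _ h7,
    hbeq _ h8, hbeq _ h9]
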